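-- pv_equiv track=rewrite | github.com/pypi-data/pypi-mirror-404 | packages/linuxmole/linuxmole-1.0.3-py3-none-any.whl/linuxmole/commands/_helpers.py | summary_totals
-- ===== SOURCE A (Python) =====
-- from typing import Dict, List, Optional, Tuple
--
-- def summary_totals(items: List[Dict]) -> Tuple[int, bool, int, int]:
--     """Calculate total bytes, unknown flag, total items, and categories."""
--     total_bytes = 0
--     unknown = False
--     total_items = 0
--     categories = len(items)
--     for it in items:
--         count = it["count"]
--         if count > 0:
--             total_items += count
--         if it.get("unknown"):
--             unknown = True
--         if it["bytes"] is None: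
--             if count > 0:
--                 unknown = True
--         else:
--             total_bytes += it["bytes"]
--     return total_bytes, unknown, total_items, categories
-- ===== SOURCE B (Python) =====
-- def summary_totals(items):
--     """Calculate total bytes, unknown flag, total items, and categories.
--
--     Divide-and-conquer: each item is mapped to a one-item summary and
--     summaries are merged pairwise (sums/or), which is correct because the
--     merge is associative with (0, False, 0, 0) as identity.
--     """
--     def single(it):
--         count = it["count"]
--         b = it["bytes"]
--         return (0 if b is None else b,
--                 bool(it.get("unknown")) or (b is None and count > 0),
--                 count if count > 0 else 0,
--                 1)
--
--     def merge(l, r):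
--         return (l[0] + r[0], l[1] or r[1], l[2] + r[2], l[3] + r[3])
--
--     def agg(lo, hi):
--         if hi - lo == 0:
--             return (0, False, 0, 0)
--         if hi - lo == 1:
--             return single(items[lo])
--         mid = (lo + hi) // 2
--         return merge(agg(lo, mid), agg(mid, hi))
--
--     return agg(0, len(items))
-- ===== Notes on version B (the rewrite author's own statement) =====
-- stated objective: alternative
-- what changed: A's single fused left-to-right loop with three mutable accumulators is replaced by a map-reduce divide-and-conquer: each dict is mapped to a one-item summary tuple and summaries are merged pairwise over recursively halved index ranges, exploiting that the merge is an associative monoid operation.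
import Mathlib
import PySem

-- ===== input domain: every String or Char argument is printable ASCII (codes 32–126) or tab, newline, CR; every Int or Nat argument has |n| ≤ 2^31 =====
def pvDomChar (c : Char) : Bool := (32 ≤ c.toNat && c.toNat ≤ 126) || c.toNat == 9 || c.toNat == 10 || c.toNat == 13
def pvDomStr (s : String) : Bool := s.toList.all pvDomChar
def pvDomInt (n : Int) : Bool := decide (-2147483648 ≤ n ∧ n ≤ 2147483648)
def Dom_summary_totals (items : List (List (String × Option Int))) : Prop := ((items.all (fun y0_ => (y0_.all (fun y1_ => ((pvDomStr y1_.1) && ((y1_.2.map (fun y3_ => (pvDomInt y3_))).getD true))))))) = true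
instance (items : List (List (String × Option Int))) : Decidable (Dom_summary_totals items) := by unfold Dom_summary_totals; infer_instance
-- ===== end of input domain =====

-- B replaces A's fused accumulator loop by a map-reduce divide-and-conquer:
-- per-item summaries merged pairwise over recursively halved ranges (same O(n) cost).

-- ===== PORT A =====
-- it["count"] (an int under Pre_; the getD defaults are only reached outside Pre_)
def pvCount (it : List (String × Option Int)) : Int :=
  ((it.lookup "count").getD none).getD 0
-- it["bytes"] (present under Pre_; may be None)
def pvBytes (it : List (String × Option Int)) : Option Int :=
  (it.lookup "bytes").getD none
-- truthiness of it.get("unknown"): non-None and nonzero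
def pvUnk (it : List (String × Option Int)) : Bool :=
  match it.lookup "unknown" with
  | some (some v) => v != 0
  | _ => false

def summary_totals (items : List (List (String × Option Int))) : Int × Bool × Int × Int :=
  let s := items.foldl (fun (st : Int × Bool × Int) it =>
    let count := pvCount it
    let ti := if count > 0 then st.2.2 + count else st.2.2
    let u := if pvUnk it then true else st.2.1
    match pvBytes it with
    | none => (st.1, if count > 0 then true else u, ti)
    | some b => (st.1 + b, u, ti)) (0, false, 0)
  (s.1, s.2.1, s.2.2, (items.length : Int))

-- ===== PORT B =====
-- single(it): the summary of one item
def stSingle (it : List (String × Option Int)) : Int × Bool × Int × Int :=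
  ((pvBytes it).getD 0,
   pvUnk it || ((pvBytes it == none) && pvCount it > 0),
   if pvCount it > 0 then pvCount it else 0,
   1)

-- merge(l, r)
def stMerge (l r : Int × Bool × Int × Int) : Int × Bool × Int × Int :=
  (l.1 + r.1, l.2.1 || r.2.1, l.2.2.1 + r.2.2.1, l.2.2.2 + r.2.2.2)

-- agg(lo, hi), written on the sublist items[lo:hi] (halved at each step like Source B)
def stAgg : List (List (String × Option Int)) → Int × Bool × Int × Int
  | [] => (0, false, 0, 0)
  | [it] => stSingle it
  | a :: b :: rest =>
      let l := a :: b :: rest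
      stMerge (stAgg (l.take (l.length / 2))) (stAgg (l.drop (l.length / 2)))
termination_by l => l.length
decreasing_by
  · simp only [List.length_take, List.length_cons]; omega
  · simp only [List.length_drop, List.length_cons]; omega

def summary_totals_alt (items : List (List (String × Option Int))) : Int × Bool × Int × Int :=
  stAgg items

-- ===== PRECONDITION & SPEC =====
-- Pre_ excludes dicts on which A raises: a missing "count" or "bytes" key (KeyError),
-- or a None "count" (TypeError on `count > 0`).
def Pre_summary_totals (items : List (List (String × Option Int))) : Prop :=
  (items.all (fun it =>
    ((it.lookup "count").getD none).isSome && (it.lookup "bytes").isSome)) = true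
instance (items : List (List (String × Option Int))) : Decidable (Pre_summary_totals items) := by unfold Pre_summary_totals; infer_instance

def pvWitness_summary_totals : (List (List (String × Option Int))) :=
  [[("count", some 2), ("bytes", none), ("unknown", some 0)],
   [("count", some 0), ("bytes", some 7)]]

def Spec_summary_totals (items : List (List (String × Option Int))) (out : Int × Bool × Int × Int) : Prop := out = summary_totals_alt items
instance (items : List (List (String × Option Int))) (out : Int × Bool × Int × Int) : Decidable (Spec_summary_totals items out) := by unfold Spec_summary_totals; infer_instance

-- ===== CLAIM (what is proved, stated in full; the proofs are below) =====
def Claim_equal_summary_totals : Prop := ∀ (items : List (List (String × Option Int))), Dom_summary_totals items → Pre_summary_totals items → Spec_summary_totals items (summary_totals items)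

-- ===== LEMMAS AND PROOFS =====

theorem stMerge_assoc (a b c : Int × Bool × Int × Int) :
    stMerge (stMerge a b) c = stMerge a (stMerge b c) := by
  simp [stMerge, Int.add_assoc, Bool.or_assoc]

theorem stMerge_id_left (a : Int × Bool × Int × Int) : stMerge (0, false, 0, 0) a = a := by
  simp [stMerge]

theorem foldr_merge_shift (l : List (List (String × Option Int)))
    (s : Int × Bool × Int × Int) :
    stMerge (l.foldr (fun it acc => stMerge (stSingle it) acc) (0, false, 0, 0)) s
      = l.foldr (fun it acc => stMerge (stSingle it) acc) s := by
  induction l with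
  | nil => simp [stMerge_id_left]
  | cons it rest ih => simp only [List.foldr_cons, stMerge_assoc, ih]

theorem stAgg_eq_foldr (l : List (List (String × Option Int))) :
    stAgg l = l.foldr (fun it acc => stMerge (stSingle it) acc) (0, false, 0, 0) := by
  induction l using stAgg.induct with
  | case1 => simp [stAgg]
  | case2 it => simp [stAgg, stMerge, stSingle]
  | case3 a b rest l ih1 ih2 =>
    rw [stAgg]
    rw [ih1, ih2, foldr_merge_shift, ← List.foldr_append, List.take_append_drop]

theorem summary_totals_fold (items : List (List (String × Option Int)))
    (tb : Int) (unk : Bool) (ti : Int) :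
    items.foldl (fun (st : Int × Bool × Int) it =>
      let count := pvCount it
      let ti := if count > 0 then st.2.2 + count else st.2.2
      let u := if pvUnk it then true else st.2.1
      match pvBytes it with
      | none => (st.1, if count > 0 then true else u, ti)
      | some b => (st.1 + b, u, ti)) (tb, unk, ti)
    = (tb + (items.foldr (fun it acc => stMerge (stSingle it) acc) (0, false, 0, 0)).1,
       unk || (items.foldr (fun it acc => stMerge (stSingle it) acc) (0, false, 0, 0)).2.1,
       ti + (items.foldr (fun it acc => stMerge (stSingle it) acc) (0, false, 0, 0)).2.2.1) := by
  induction items generalizing tb unk ti with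
  | nil => simp
  | cons it rest ih =>
    simp only [List.foldl_cons, List.foldr_cons]
    cases hb : pvBytes it with
    | none =>
      rw [ih]
      simp only [stMerge, stSingle, hb, Prod.mk.injEq]
      refine ⟨by simp, ?_, ?_⟩
      · cases unk <;> cases pvUnk it <;> by_cases hc : pvCount it > 0 <;>
          simp [hc, Bool.or_assoc]
      · by_cases hc : pvCount it > 0 <;> simp [hc] ; ring
    | some b =>
      rw [ih]
      simp only [stMerge, stSingle, hb, Prod.mk.injEq]
      refine ⟨by simp; ring, ?_, ?_⟩
      · cases unk <;> cases pvUnk it <;> simp [Bool.or_assoc]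
      · by_cases hc : pvCount it > 0 <;> simp [hc] ; ring

theorem foldr_merge_length (items : List (List (String × Option Int))) :
    (items.foldr (fun it acc => stMerge (stSingle it) acc) (0, false, 0, 0)).2.2.2
      = (items.length : Int) := by
  induction items with
  | nil => simp
  | cons it rest ih =>
    rw [List.foldr_cons,
      show ∀ (a b : Int × Bool × Int × Int), (stMerge a b).2.2.2 = a.2.2.2 + b.2.2.2
        from fun _ _ => rfl, ih]
    simp [stSingle]; ring

-- ===== VERDICT (by name: the statement is the Claim_ definition above) =====
theorem summary_totals_spec : Claim_equal_summary_totals := by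
  intro items _ _
  show _ = _
  simp only [summary_totals, summary_totals_alt, stAgg_eq_foldr, summary_totals_fold]
  simp [foldr_merge_length, Prod.ext_iff]
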